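-- pv_equiv track=rewrite | github.com/PdxCodeGuild/class_armadillo | Code/Kyle/lab12_Peaks_And_Valleys.py | valley_finder
-- ===== SOURCE A (Python) =====
-- def valley_finder(data):
--     valley = []
--     for i in range(1, len(data)-1):
--         first_point = data[i-1]
--         second_point = data[i]
--         third_point = data[i+1]
--         if first_point > second_point and second_point < third_point:
--             valley.append(i)
--     return valley
-- ===== SOURCE B (Python) =====
-- def valley_finder(data):
--     deltas = [data[k + 1] - data[k] for k in range(len(data) - 1)]
--     return [i for i in range(1, len(data) - 1) if deltas[i - 1] < 0 and deltas[i] > 0]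
-- ===== Notes on version B (the rewrite author's own statement) =====
-- stated objective: alternative
-- what changed: B first computes a difference array of consecutive deltas, then selects indices where the discrete derivative flips from negative to positive, instead of re-fetching three raw points per index.
import Mathlib
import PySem

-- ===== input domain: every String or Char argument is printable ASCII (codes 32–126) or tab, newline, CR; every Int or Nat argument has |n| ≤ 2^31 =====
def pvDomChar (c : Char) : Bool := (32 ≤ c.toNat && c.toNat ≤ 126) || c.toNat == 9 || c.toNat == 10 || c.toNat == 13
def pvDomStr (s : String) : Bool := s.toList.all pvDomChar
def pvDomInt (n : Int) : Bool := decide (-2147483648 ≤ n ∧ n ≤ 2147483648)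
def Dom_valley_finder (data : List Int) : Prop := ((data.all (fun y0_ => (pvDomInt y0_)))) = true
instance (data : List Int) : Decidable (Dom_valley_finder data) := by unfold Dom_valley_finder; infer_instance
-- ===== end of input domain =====

-- B recomputes the same strict valleys through a separately built difference array (sign change of the
-- discrete derivative) instead of fetching three raw points per index; alternative decomposition, same cost.

-- ===== PORT A =====
def valley_finder (data : List Int) : List Int :=
  (PySem.List.pyRange 1 ((data.length : Int) - 1) 1).foldl
    (fun valley i =>
      let first_point := PySem.List.pyGetD data (i - 1) 0
      let second_point := PySem.List.pyGetD data i 0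
      let third_point := PySem.List.pyGetD data (i + 1) 0
      if first_point > second_point ∧ second_point < third_point then valley ++ [i] else valley)
    []

-- ===== PORT B =====
def valley_finder_alt (data : List Int) : List Int :=
  let deltas : List Int :=
    (PySem.List.pyRange 0 ((data.length : Int) - 1) 1).map
      (fun k => PySem.List.pyGetD data (k + 1) 0 - PySem.List.pyGetD data k 0)
  (PySem.List.pyRange 1 ((data.length : Int) - 1) 1).filter
    (fun i => decide (PySem.List.pyGetD deltas (i - 1) 0 < 0 ∧ PySem.List.pyGetD deltas i 0 > 0))

-- ===== PRECONDITION & SPEC =====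
def Spec_valley_finder (data : List Int) (out : List Int) : Prop := out = valley_finder_alt data
instance (data : List Int) (out : List Int) : Decidable (Spec_valley_finder data out) := by unfold Spec_valley_finder; infer_instance

-- ===== CLAIM (what is proved, stated in full; the proofs are below) =====
def Claim_equal_valley_finder : Prop := ∀ (data : List Int), Dom_valley_finder data → Spec_valley_finder data (valley_finder data)

-- ===== LEMMAS AND PROOFS =====

-- B's delta lookup evaluated: deltas[j] = data[j+1] - data[j] for 0 ≤ j < len-1.
theorem delta_lookup (data : List Int) (j : Int) (h0 : 0 ≤ j) (h1 : j < (data.length : Int) - 1) :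
    PySem.List.pyGetD
      ((PySem.List.pyRange 0 ((data.length : Int) - 1) 1).map
        (fun k => PySem.List.pyGetD data (k + 1) 0 - PySem.List.pyGetD data k 0)) j 0
      = PySem.List.pyGetD data (j + 1) 0 - PySem.List.pyGetD data j 0 :=
  PySem.List.pyGetD_map_pyRange_of_nonneg _ _ j 0 h0 h1

-- ===== VERDICT (by name: the statement is the Claim_ definition above) =====
theorem valley_finder_spec : Claim_equal_valley_finder := by
  intro data _
  show valley_finder data = valley_finder_alt data
  unfold valley_finder valley_finder_alt
  rw [PySem.List.foldl_append_ite_eq_filter]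
  simp only [List.nil_append]
  apply List.filter_congr
  intro i hi
  rw [PySem.List.mem_pyRange_one] at hi
  rw [delta_lookup data (i - 1) (by omega) (by omega),
      delta_lookup data i (by omega) (by omega)]
  simp only [decide_eq_decide, sub_add_cancel]
  omega
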